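-- pv_equiv track=rewrite | github.com/VictorsVectors/devsecops-pipeline | reporting/generate-report.py | build_tool_summary
-- ===== SOURCE A (Python) =====
-- def build_tool_summary(all_findings):
--     summary = {}
--     for f in all_findings:
--         tool = f.get("tool", "unknown")
--         if tool not in summary:
--             summary[tool] = {"CRITICAL": 0, "HIGH": 0, "MEDIUM": 0, "LOW": 0, "INFO": 0, "total": 0}
--         sev = f.get("severity", "INFO").upper()
--         summary[tool][sev] = summary[tool].get(sev, 0) + 1
--         summary[tool]["total"] += 1
--     return summary
-- ===== SOURCE B (Python) =====
-- def build_tool_summary(all_findings):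
--     # Pass 1: group the upper-cased severities by tool.
--     groups = {}
--     for f in all_findings:
--         groups.setdefault(f.get("tool", "unknown"), []).append(f.get("severity", "INFO").upper())
--     # Pass 2: one summary row per tool from the fixed template.
--     summary = {}
--     for tool, sevs in groups.items():
--         counts = {"CRITICAL": 0, "HIGH": 0, "MEDIUM": 0, "LOW": 0, "INFO": 0, "total": 0}
--         for s in sevs:
--             counts[s] = counts.get(s, 0) + 1
--         counts["total"] = len(sevs)
--         summary[tool] = counts
--     return summary
-- ===== Notes on version B (the rewrite author's own statement) =====
-- stated objective: alternative
-- what changed: A aggregates in one pass with a running per-tool accumulator (seeding the template and bumping sev and total per finding); B first groups upper-cased severities by tool in one pass, then in a second pass builds each tool's row from the template by counting and sets total = len(group).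
import Mathlib
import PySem

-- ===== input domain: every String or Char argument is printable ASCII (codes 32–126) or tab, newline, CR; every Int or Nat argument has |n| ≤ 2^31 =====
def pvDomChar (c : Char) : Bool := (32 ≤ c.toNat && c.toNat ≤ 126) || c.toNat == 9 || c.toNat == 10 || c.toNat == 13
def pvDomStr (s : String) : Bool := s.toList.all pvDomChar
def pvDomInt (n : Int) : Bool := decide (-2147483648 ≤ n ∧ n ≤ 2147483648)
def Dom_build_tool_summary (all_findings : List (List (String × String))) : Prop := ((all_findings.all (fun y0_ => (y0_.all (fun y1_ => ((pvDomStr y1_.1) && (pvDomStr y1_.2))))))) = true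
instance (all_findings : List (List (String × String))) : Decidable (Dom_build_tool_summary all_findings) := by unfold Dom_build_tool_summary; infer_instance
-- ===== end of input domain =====

-- B separates grouping (findings by tool) from aggregation (template + counts per tool)
-- instead of A's single running accumulator; objective: alternative decomposition, same cost.

-- shared accessors: f.get("tool", "unknown") and f.get("severity", "INFO").upper()
def pvToolOf (f : List (String × String)) : String := (PySem.Dict.mk f).getD "tool" "unknown"
def pvSevOf (f : List (String × String)) : String := PySem.Str.upper ((PySem.Dict.mk f).getD "severity" "INFO")
-- the dict literal {"CRITICAL": 0, "HIGH": 0, "MEDIUM": 0, "LOW": 0, "INFO": 0, "total": 0}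
def pvTemplate : PySem.Dict String Int :=
  PySem.Dict.mk [("CRITICAL", 0), ("HIGH", 0), ("MEDIUM", 0), ("LOW", 0), ("INFO", 0), ("total", 0)]

-- ===== PORT A =====
def pvStepA (summary : PySem.Dict String (PySem.Dict String Int)) (f : List (String × String)) :
    PySem.Dict String (PySem.Dict String Int) :=
  let tool := pvToolOf f
  let summary := if summary.contains tool then summary else summary.insert tool pvTemplate
  let sev := pvSevOf f
  let inner := summary.getD tool PySem.Dict.empty
  let inner := inner.insert sev (inner.getD sev 0 + 1)          -- summary[tool][sev] = ….get(sev, 0) + 1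
  let inner := inner.modify "total" 0 (· + 1)                   -- summary[tool]["total"] += 1
  summary.insert tool inner

def build_tool_summary (all_findings : List (List (String × String))) : List (String × List (String × Int)) :=
  ((all_findings.foldl pvStepA PySem.Dict.empty).items.map (fun p => (p.1, p.2.items)))

-- ===== PORT B =====
-- pass 1: groups.setdefault(tool, []).append(sev)
def pvGroups (all_findings : List (List (String × String))) : PySem.Dict String (List String) :=
  all_findings.foldl (fun g f => g.modify (pvToolOf f) [] (· ++ [pvSevOf f])) PySem.Dict.empty

-- pass 2 body: template copy, count severities, then total = len(sevs)
def pvCounts (sevs : List String) : PySem.Dict String Int :=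
  (sevs.foldl (fun c s => c.insert s (c.getD s 0 + 1)) pvTemplate).insert "total" (sevs.length : Int)

def build_tool_summary_alt (all_findings : List (List (String × String))) : List (String × List (String × Int)) :=
  (((pvGroups all_findings).items.foldl (fun s p => s.insert p.1 (pvCounts p.2)) PySem.Dict.empty).items.map
    (fun p => (p.1, p.2.items)))

-- ===== PRECONDITION & SPEC =====
def Spec_build_tool_summary (all_findings : List (List (String × String))) (out : List (String × List (String × Int))) : Prop := out = build_tool_summary_alt all_findings
instance (all_findings : List (List (String × String))) (out : List (String × List (String × Int))) : Decidable (Spec_build_tool_summary all_findings out) := by unfold Spec_build_tool_summary; infer_instance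

-- ===== CLAIM (what is proved, stated in full; the proofs are below) =====
def Claim_equal_build_tool_summary : Prop := ∀ (all_findings : List (List (String × String))), Dom_build_tool_summary all_findings → Spec_build_tool_summary all_findings (build_tool_summary all_findings)

-- ===== LEMMAS AND PROOFS =====

-- A's inner-row update, and the inner row grown from the template over a severity list
def pvBump (c : PySem.Dict String Int) (s : String) : PySem.Dict String Int :=
  ((c.insert s (c.getD s 0 + 1)).modify "total" 0 (· + 1))

def pvInnerA (sevs : List String) : PySem.Dict String Int := sevs.foldl pvBump pvTemplate

-- A's summary as a rendering of the grouping dict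
def pvRender (g : PySem.Dict String (List String)) : PySem.Dict String (PySem.Dict String Int) :=
  PySem.Dict.mk (g.items.map (fun p => (p.1, pvInnerA p.2)))

theorem pv_keys_render (g : PySem.Dict String (List String)) : (pvRender g).keys = g.keys := by
  simp [pvRender, PySem.Dict.keys]

theorem pv_contains_render (g : PySem.Dict String (List String)) (k : String) :
    (pvRender g).contains k = g.contains k := by
  simp [PySem.Dict.contains_eq_decide_mem_keys, pv_keys_render]

-- .upper() never yields the lowercase key "total"
theorem pv_upperChar_ne_t (c : Char) : PySem.Chars.upperChar c ≠ 't' := by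
  by_cases h : PySem.Chars.islower c = true
  · simp only [PySem.Chars.upperChar, h, if_true]
    have hc : 'a' ≤ c ∧ c ≤ 'z' := by simpa [PySem.Chars.islower] using h
    have h1 : 97 ≤ c.toNat := hc.1
    have h2 : c.toNat ≤ 122 := hc.2
    have hval : (Char.ofNat (c.toNat - 32)).toNat = c.toNat - 32 := by
      unfold Char.ofNat
      rw [dif_pos (Or.inl (by omega : c.toNat - 32 < 55296))]
      rfl
    intro he
    have h116 : (Char.ofNat (c.toNat - 32)).toNat = 116 := by rw [he]; rfl
    omega
  · simp only [PySem.Chars.upperChar, h]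
    intro he
    subst he
    simp [PySem.Chars.islower] at h

theorem pv_upper_ne_total (s : String) : PySem.Str.upper s ≠ "total" := by
  intro he
  have h : (PySem.Str.upper s).toList = "total".toList := by rw [he]
  rw [PySem.Str.toList_upper] at h
  unfold PySem.Chars.upper at h
  cases cs : s.toList with
  | nil => rw [cs] at h; simp at h
  | cons c rest =>
    rw [cs] at h
    have : PySem.Chars.upperChar c = 't' := by
      have := congrArg (fun l => l.head?) h
      simpa using this
    exact pv_upperChar_ne_t c this

-- inserting at a present key commutes (as items lists) with inserting at another key
theorem pv_insert_comm {ν : Type} (d : PySem.Dict String ν) (k k' : String) (v w : ν)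
    (h : d.contains k = true) (hne : k' ≠ k) :
    (d.insert k v).insert k' w = (d.insert k' w).insert k v := by
  apply PySem.Dict.ext
  by_cases hc' : d.contains k' = true
  · have hkv' : (d.insert k v).contains k' = true := by
      rw [PySem.Dict.contains_insert]; simp [hc']
    have hk'v : (d.insert k' w).contains k = true := by
      rw [PySem.Dict.contains_insert]; simp [h]
    rw [PySem.Dict.items_insert_of_contains _ _ hkv', PySem.Dict.items_insert_of_contains _ _ h,
        PySem.Dict.items_insert_of_contains _ _ hk'v, PySem.Dict.items_insert_of_contains _ _ hc']
    simp only [List.map_map]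
    apply List.map_congr_left
    intro p _
    obtain ⟨a, b⟩ := p
    by_cases hpk : a = k <;> by_cases hpk' : a = k' <;>
      simp_all [Function.comp, Ne.symm hne]
  · have hc'f : d.contains k' = false := by simpa using hc'
    have hc'2 : (d.insert k v).contains k' = false := by
      rw [PySem.Dict.contains_insert]; simp [hc'f, hne]
    have hc2 : (d.insert k' w).contains k = true := by
      rw [PySem.Dict.contains_insert]; simp [h]
    rw [PySem.Dict.items_insert_of_not_contains _ _ hc'2,
        PySem.Dict.items_insert_of_contains _ _ h,
        PySem.Dict.items_insert_of_contains _ _ hc2,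
        PySem.Dict.items_insert_of_not_contains _ _ hc'f]
    simp
    exact fun hk => absurd hk hne

-- re-inserting the stored value at a present key is the identity (keys unique)
theorem pv_insert_getD_self {ν : Type} (d : PySem.Dict String ν) (k : String) (d0 : ν)
    (hnd : d.keys.Nodup) (h : d.contains k = true) : d.insert k (d.getD k d0) = d := by
  apply PySem.Dict.ext
  rw [PySem.Dict.items_insert_of_contains _ _ h]
  conv_rhs => rw [← List.map_id d.items]
  apply List.map_congr_left
  intro p hp
  obtain ⟨a, b⟩ := p
  by_cases hpk : a = k
  · have hv : d.getD k d0 = b := PySem.Dict.getD_of_mem_items _ (hpk ▸ hp) hnd _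
    simp [hpk, hv]
  · simp [hpk]

-- pushing an insert at "total" through the counting loop
theorem pv_push_total (sevs : List String) : ∀ (d : PySem.Dict String Int) (x : Int),
    d.contains "total" = true → (∀ s ∈ sevs, s ≠ "total") →
    sevs.foldl (fun c s => c.insert s (c.getD s 0 + 1)) (d.insert "total" x) =
      (sevs.foldl (fun c s => c.insert s (c.getD s 0 + 1)) d).insert "total" x := by
  induction sevs with
  | nil => intro d x _ _; rfl
  | cons s rest ih =>
    intro d x hct hs
    have hsne : s ≠ "total" := hs s (by simp)
    simp only [List.foldl_cons]
    rw [PySem.Dict.getD_insert_of_ne d x 0 hsne, pv_insert_comm d "total" s x _ hct hsne,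
        ih _ _ (by rw [PySem.Dict.contains_insert]; simp [hct]) (fun t ht => hs t (by simp [ht]))]

-- A's interleaved row loop = B's count loop followed by total = len
theorem pv_inner_eq (sevs : List String) : ∀ (c : PySem.Dict String Int),
    c.keys.Nodup → c.contains "total" = true → (∀ s ∈ sevs, s ≠ "total") →
    sevs.foldl pvBump c =
      (sevs.foldl (fun c s => c.insert s (c.getD s 0 + 1)) c).insert "total"
        (c.getD "total" 0 + (sevs.length : Int)) := by
  induction sevs with
  | nil =>
    intro c hnd hct _
    simp only [List.foldl_nil, List.length_nil, Nat.cast_zero, add_zero]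
    exact (pv_insert_getD_self c "total" 0 hnd hct).symm
  | cons s rest ih =>
    intro c hnd hct hs
    have hsne : s ≠ "total" := hs s (by simp)
    have hrest : ∀ t ∈ rest, t ≠ "total" := fun t ht => hs t (by simp [ht])
    simp only [List.foldl_cons]
    have hb : pvBump c s = (c.insert s (c.getD s 0 + 1)).insert "total" (c.getD "total" 0 + 1) := by
      simp only [pvBump, PySem.Dict.modify]
      rw [PySem.Dict.getD_insert_of_ne c _ 0 (Ne.symm hsne)]
    rw [hb, ih _
        (PySem.Dict.nodup_keys_insert _ _ _ (PySem.Dict.nodup_keys_insert _ _ _ hnd))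
        (PySem.Dict.contains_insert_self _ _ _) hrest,
      PySem.Dict.getD_insert_self, pv_push_total rest _ _
        (by rw [PySem.Dict.contains_insert]; simp [hct]) hrest,
      PySem.Dict.insert_insert_self]
    congr 1
    simp only [List.length_cons]
    push_cast
    ring

-- one A-step on a rendered grouping = rendering the grouping step
theorem pv_stepA_render (g : PySem.Dict String (List String)) (f : List (String × String))
    (hnd : g.keys.Nodup) :
    pvStepA (pvRender g) f = pvRender (g.modify (pvToolOf f) [] (· ++ [pvSevOf f])) := by
  set t := pvToolOf f with ht
  set s := pvSevOf f with hsv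
  by_cases hc : g.contains t = true
  · -- tool already present
    obtain ⟨sevs, hget⟩ : ∃ sevs, g.get? t = some sevs := by
      have h1 := PySem.Dict.contains_eq_isSome_get? g t
      rw [hc] at h1
      exact Option.isSome_iff_exists.mp h1.symm
    have hmem : (t, sevs) ∈ g.items := PySem.Dict.mem_items_of_get?_eq_some _ hget
    have hmemR : (t, pvInnerA sevs) ∈ (pvRender g).items := by
      simp only [pvRender]
      exact List.mem_map.mpr ⟨(t, sevs), hmem, rfl⟩
    have hndR : (pvRender g).keys.Nodup := by rw [pv_keys_render]; exact hnd
    have hgetD : (pvRender g).getD t PySem.Dict.empty = pvInnerA sevs :=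
      PySem.Dict.getD_of_mem_items _ hmemR hndR _
    have hcR : (pvRender g).contains t = true := by rw [pv_contains_render]; exact hc
    have hgdg : g.getD t [] = sevs := PySem.Dict.getD_of_get?_eq_some _ _ hget
    apply PySem.Dict.ext
    simp only [pvStepA, hcR, if_true, ← ht, ← hsv, hgetD]
    have hstep : ((pvInnerA sevs).insert s ((pvInnerA sevs).getD s 0 + 1)).modify "total" 0 (· + 1)
        = pvInnerA (sevs ++ [s]) := by
      simp only [pvInnerA, List.foldl_append, List.foldl_cons, List.foldl_nil, pvBump]
    rw [hstep, PySem.Dict.items_insert_of_contains _ _ hcR]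
    simp only [PySem.Dict.modify, pvRender, hgdg,
      PySem.Dict.items_insert_of_contains _ _ hc, List.map_map]
    apply List.map_congr_left
    intro p hp
    obtain ⟨a, b⟩ := p
    by_cases hpk : a = t
    · simp [Function.comp, hpk]
    · simp [Function.comp, hpk]
  · -- new tool: seeded with the template
    have hcR : (pvRender g).contains t = false := by
      rw [pv_contains_render]; simpa using hc
    have hcf : g.contains t = false := by simpa using hc
    have htk : ¬ t ∈ g.keys := fun hk =>
      hc ((PySem.Dict.contains_iff_mem_keys g t).mpr hk)
    have hgd : g.getD t [] = [] := PySem.Dict.getD_of_not_contains _ _ hcf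
    apply PySem.Dict.ext
    simp only [pvStepA, hcR, if_false, ← ht, ← hsv, Bool.false_eq_true]
    rw [PySem.Dict.getD_insert_self]
    have hone : ((pvTemplate.insert s (pvTemplate.getD s 0 + 1)).modify "total" 0 (· + 1))
        = pvInnerA [s] := by
      simp only [pvInnerA, List.foldl_cons, List.foldl_nil, pvBump]
    rw [hone, PySem.Dict.insert_insert_self,
        PySem.Dict.items_insert_of_not_contains _ _ hcR]
    simp only [PySem.Dict.modify, hgd, List.nil_append, pvRender,
      PySem.Dict.items_insert_of_not_contains _ _ hcf, List.map_append]
    rfl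

-- A's whole fold renders the grouping fold
theorem pv_foldA_render (all : List (List (String × String))) :
    ∀ (g : PySem.Dict String (List String)), g.keys.Nodup →
    all.foldl pvStepA (pvRender g) =
      pvRender (all.foldl (fun g f => g.modify (pvToolOf f) [] (· ++ [pvSevOf f])) g) := by
  induction all with
  | nil => intro g _; rfl
  | cons f rest ih =>
    intro g hnd
    simp only [List.foldl_cons]
    rw [pv_stepA_render g f hnd]
    exact ih _ (by
      simp only [PySem.Dict.modify]
      exact PySem.Dict.nodup_keys_insert _ _ _ hnd)

theorem pv_nodup_groups (all : List (List (String × String))) : (pvGroups all).keys.Nodup := by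
  unfold pvGroups
  exact PySem.Dict.nodup_keys_foldl_modify_key all pvToolOf [] (fun _ f l => l ++ [pvSevOf f]) _
    PySem.Dict.nodup_keys_empty

-- every severity stored in the grouping dict is an .upper() result, hence never "total"
theorem pv_groups_sevs (all : List (List (String × String))) (p : String × List String)
    (hp : p ∈ (pvGroups all).items) : ∀ s ∈ p.2, s ≠ "total" := by
  intro s hs
  obtain ⟨a, b⟩ := p
  have hgd : (pvGroups all).getD a [] = b :=
    PySem.Dict.getD_of_mem_items _ hp (pv_nodup_groups all) _
  have hfold : pvGroups all = (all.map (fun f => (pvToolOf f, pvSevOf f))).foldl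
      (fun d q => d.modify q.1 [] (· ++ [q.2])) PySem.Dict.empty := by
    unfold pvGroups
    rw [List.foldl_map]
  have hchar : (pvGroups all).getD a [] =
      List.map (fun x => x.2) (List.filter (fun q => q.1 == a)
        (all.map (fun f => (pvToolOf f, pvSevOf f)))) := by
    rw [hfold]
    simpa using PySem.Dict.getD_foldl_modify_append
      (all.map (fun f => (pvToolOf f, pvSevOf f))) PySem.Dict.empty a
  rw [← hgd, hchar] at hs
  obtain ⟨q, hq, rfl⟩ := List.mem_map.mp hs
  have hq2 := (List.mem_filter.mp hq).1
  obtain ⟨f, _, rfl⟩ := List.mem_map.mp hq2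
  exact pv_upper_ne_total _

theorem pv_template_facts : pvTemplate.keys.Nodup ∧ pvTemplate.contains "total" = true ∧
    pvTemplate.getD "total" 0 = 0 := by decide

-- ===== VERDICT (by name: the statement is the Claim_ definition above) =====
theorem build_tool_summary_spec : Claim_equal_build_tool_summary := by
  intro all _
  unfold Spec_build_tool_summary build_tool_summary build_tool_summary_alt
  have hnd := pv_nodup_groups all
  have hA : all.foldl pvStepA PySem.Dict.empty = pvRender (pvGroups all) := by
    have h0 : (PySem.Dict.empty : PySem.Dict String (PySem.Dict String Int))
        = pvRender (PySem.Dict.empty : PySem.Dict String (List String)) := rfl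
    rw [h0, pv_foldA_render all PySem.Dict.empty PySem.Dict.nodup_keys_empty]
    rfl
  have hB : ((pvGroups all).items.foldl (fun s p => s.insert p.1 (pvCounts p.2))
      PySem.Dict.empty).items = (pvGroups all).items.map (fun p => (p.1, pvCounts p.2)) := by
    have h1 := PySem.Dict.items_foldl_insert_fresh (pvGroups all).items Prod.fst
      (fun p => pvCounts p.2) PySem.Dict.empty (fun a _ => PySem.Dict.contains_empty _)
      (by exact hnd)
    simpa using h1
  rw [hA, hB]
  simp only [pvRender, List.map_map]
  apply List.map_congr_left
  intro p hp
  have hsevs := pv_groups_sevs all p hp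
  obtain ⟨hndT, hctT, hgdT⟩ := pv_template_facts
  have hinner : pvInnerA p.2 = pvCounts p.2 := by
    unfold pvInnerA pvCounts
    rw [pv_inner_eq p.2 pvTemplate hndT hctT hsevs, hgdT, zero_add]
  simp [Function.comp, hinner]
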